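-- pv_equiv track=rewrite | github.com/MoulyT/advent-of-code-python | 2023/12/advent_code.py | is_possible_springs
-- ===== SOURCE A (Python) =====
-- def is_possible_springs(springs: str, instructions: tuple[int, ...]):
--     damaged_springs = list(filter(None, springs.split(".")))
--     result = True
--     if len(damaged_springs) != len(instructions):
--         return False
--     for spring, instruction in zip(damaged_springs, instructions, strict=False):
--         if len(spring) != instruction:
--             result = False
--             break
--     return result
-- ===== SOURCE B (Python) =====
-- def is_possible_springs(springs: str, instructions: tuple[int, ...]):
--     idx = 0
--     run = 0
--     n = len(instructions)
--     for ch in springs: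
--         if ch == '.':
--             if run:
--                 if idx >= n or instructions[idx] != run:
--                     return False
--                 idx += 1
--                 run = 0
--         else:
--             run += 1
--     if run:
--         if idx >= n or instructions[idx] != run:
--             return False
--         idx += 1
--     return idx == n
-- ===== Notes on version B (the rewrite author's own statement) =====
-- stated objective: alternative
-- what changed: B replaces A's split-on-dot + filter + length/zip comparison with a single character scan that keeps a run-length counter and an index into instructions, never materialising the groups list.
import Mathlib
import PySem

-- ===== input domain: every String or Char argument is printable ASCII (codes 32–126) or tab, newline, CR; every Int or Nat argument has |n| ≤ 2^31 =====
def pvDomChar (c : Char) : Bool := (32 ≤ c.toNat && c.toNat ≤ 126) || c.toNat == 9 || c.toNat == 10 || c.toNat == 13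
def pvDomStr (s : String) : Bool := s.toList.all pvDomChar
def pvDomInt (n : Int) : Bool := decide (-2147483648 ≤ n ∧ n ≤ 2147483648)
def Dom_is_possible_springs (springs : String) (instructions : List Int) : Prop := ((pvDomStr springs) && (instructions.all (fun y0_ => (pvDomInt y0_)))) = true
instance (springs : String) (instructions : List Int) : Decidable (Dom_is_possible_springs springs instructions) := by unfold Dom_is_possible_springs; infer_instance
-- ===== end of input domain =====

-- B replaces A's split-on-'.'/filter/zip pipeline by a single one-pass run-length scan (alternative decomposition, same cost).

-- ===== PORT A =====
-- A's for-loop over zip(damaged_springs, instructions) with its early break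
def aLoop : List (List Char × Int) → Bool
  | [] => true
  | (spring, instruction) :: rest =>
      if (spring.length : Int) ≠ instruction then false else aLoop rest

def is_possible_springs (springs : String) (instructions : List Int) : Bool :=
  -- list(filter(None, springs.split(".")))
  let damaged := (PySem.Chars.splitOn springs.toList ['.']).filter (fun x => !x.isEmpty)
  if damaged.length ≠ instructions.length then false
  else aLoop (damaged.zip instructions)

-- ===== PORT B =====
-- Source B's character loop: run = current run length, idx = next instruction index
def altScan (instructions : List Int) : List Char → Nat → Nat → Bool
  | [], idx, run =>
      if run ≠ 0 then
        if instructions.length ≤ idx then false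
        else if instructions.getD idx 0 ≠ (run : Int) then false
        else (idx + 1) == instructions.length
      else idx == instructions.length
  | c :: rest, idx, run =>
      if c = '.' then
        if run ≠ 0 then
          if instructions.length ≤ idx then false
          else if instructions.getD idx 0 ≠ (run : Int) then false
          else altScan instructions rest (idx + 1) 0
        else altScan instructions rest idx 0
      else altScan instructions rest idx (run + 1)

def is_possible_springs_alt (springs : String) (instructions : List Int) : Bool :=
  altScan instructions springs.toList 0 0

-- ===== PRECONDITION & SPEC =====
def Spec_is_possible_springs (springs : String) (instructions : List Int) (out : Bool) : Prop := out = is_possible_springs_alt springs instructions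
instance (springs : String) (instructions : List Int) (out : Bool) : Decidable (Spec_is_possible_springs springs instructions out) := by unfold Spec_is_possible_springs; infer_instance

-- ===== CLAIM (what is proved, stated in full; the proofs are below) =====
def Claim_equal_is_possible_springs : Prop := ∀ (springs : String) (instructions : List Int), Dom_is_possible_springs springs instructions → Spec_is_possible_springs springs instructions (is_possible_springs springs instructions)

-- ===== LEMMAS AND PROOFS =====

-- lengths of the maximal non-'.' runs of cs, given a pending run of length r
def grp : List Char → Nat → List Nat
  | [], r => if r = 0 then [] else [r]
  | c :: rest, r => if c = '.' then (if r = 0 then grp rest 0 else r :: grp rest 0) else grp rest (r + 1)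

-- lengths of the nonempty pieces
def flen (xs : List (List Char)) : List Nat := (xs.filter (fun x => !x.isEmpty)).map List.length

lemma go_flen (fuel : Nat) : ∀ (l cur : List Char) (acc : List (List Char)),
    l.length < fuel →
    flen (PySem.Chars.splitOn.go ['.'] fuel l cur acc) = flen acc.reverse ++ grp l cur.length := by
  induction fuel with
  | zero => intro l cur acc h; omega
  | succ f ih =>
    intro l cur acc h
    cases l with
    | nil =>
      simp [PySem.Chars.splitOn.go, flen, grp]
      by_cases hc : cur = [] <;> simp [hc]
    | cons c rest =>
      rw [PySem.Chars.splitOn.go]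
      by_cases hc : c = '.'
      · have hp : List.isPrefixOf ['.'] (c :: rest) = true := by simp [List.isPrefixOf, hc]
        rw [hp]
        simp only [if_true]
        rw [ih _ _ _ (by simpa using Nat.lt_of_succ_lt_succ h)]
        simp [flen, grp, hc]
        by_cases h0 : cur = [] <;> simp [h0]
      · have hp : List.isPrefixOf ['.'] (c :: rest) = false := by
          simp [List.isPrefixOf]; exact fun x => absurd x.symm hc
        rw [hp]
        simp only [Bool.false_eq_true, if_false]
        rw [ih _ _ _ (by simpa using Nat.lt_of_succ_lt_succ h)]
        simp [grp, hc]

lemma aLoop_eq (gs : List (List Char)) : ∀ (ins : List Int), gs.length = ins.length →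
    aLoop (gs.zip ins) = decide (gs.map (fun g => ((g.length : Nat) : Int)) = ins) := by
  induction gs with
  | nil => intro ins h; cases ins <;> simp_all [aLoop]
  | cons g rest ih =>
    intro ins h
    cases ins with
    | nil => simp at h
    | cons i is =>
      simp only [List.zip_cons_cons, aLoop, List.map_cons]
      by_cases hm : ((g.length : Int) = i)
      · rw [if_neg (by simpa using hm), ih is (by simpa using h)]
        simp [hm]
      · simp [hm]

lemma altScan_eq (instructions : List Int) (cs : List Char) :
    ∀ (idx run : Nat), idx ≤ instructions.length →
    altScan instructions cs idx run
      = decide ((grp cs run).map (fun n => ((n : Nat) : Int)) = instructions.drop idx) := by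
  induction cs with
  | nil =>
    intro idx run hidx
    by_cases hr : run = 0
    · subst hr
      rw [show altScan instructions [] idx 0 = (idx == instructions.length) by simp [altScan]]
      rw [show grp [] 0 = [] by simp [grp]]
      rw [Bool.eq_iff_iff]
      simp only [List.map_nil, beq_iff_eq, decide_eq_true_eq, List.nil_eq, List.drop_eq_nil_iff]
      omega
    · rw [show altScan instructions [] idx run =
          (if instructions.length ≤ idx then false
           else if instructions.getD idx 0 ≠ (run : Int) then false
           else (idx + 1) == instructions.length) by simp [altScan, hr]]
      rw [show grp [] run = [run] by simp [grp, hr]]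
      by_cases hle : instructions.length ≤ idx
      · have hd : instructions.drop idx = [] := by rw [List.drop_eq_nil_iff]; omega
        simp [hle, hd]
      · have hlt : idx < instructions.length := by omega
        rw [if_neg hle, List.drop_eq_getElem_cons hlt]
        have hopt : instructions[idx]? = some instructions[idx] := List.getElem?_eq_getElem hlt
        have hgdeq : instructions.getD idx 0 = instructions[idx] := by simp [List.getD, hopt]
        by_cases hgv : instructions[idx] = (run : Int)
        · rw [if_neg (not_not_intro (hgdeq.trans hgv))]
          rw [Bool.eq_iff_iff]
          simp only [List.map_cons, List.map_nil, beq_iff_eq, decide_eq_true_eq, hgv,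
            List.cons.injEq, true_and, List.nil_eq, List.drop_eq_nil_iff]
          omega
        · rw [if_pos (fun h => hgv (hgdeq.symm.trans h))]
          have hne : (([(run : Int)]) : List Int) ≠ instructions[idx] :: instructions.drop (idx+1) := by
            intro h; injection h with h1 _; exact hgv h1.symm
          exact (decide_eq_false hne).symm
  | cons c rest ih =>
    intro idx run hidx
    by_cases hc : c = '.'
    · subst hc
      by_cases hr : run = 0
      · subst hr
        rw [show altScan instructions ('.' :: rest) idx 0 = altScan instructions rest idx 0 by
            simp [altScan]]
        rw [show grp ('.' :: rest) 0 = grp rest 0 by simp [grp]]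
        exact ih idx 0 hidx
      · rw [show altScan instructions ('.' :: rest) idx run =
            (if instructions.length ≤ idx then false
             else if instructions.getD idx 0 ≠ (run : Int) then false
             else altScan instructions rest (idx + 1) 0) by simp [altScan, hr]]
        rw [show grp ('.' :: rest) run = run :: grp rest 0 by simp [grp, hr]]
        by_cases hle : instructions.length ≤ idx
        · have hd : instructions.drop idx = [] := by rw [List.drop_eq_nil_iff]; omega
          simp [hle, hd]
        · have hlt : idx < instructions.length := by omega
          rw [if_neg hle, List.drop_eq_getElem_cons hlt]
          have hopt : instructions[idx]? = some instructions[idx] := List.getElem?_eq_getElem hlt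
          have hgdeq : instructions.getD idx 0 = instructions[idx] := by simp [List.getD, hopt]
          by_cases hgv : instructions[idx] = (run : Int)
          · rw [if_neg (not_not_intro (hgdeq.trans hgv)), ih (idx+1) 0 (by omega)]
            rw [Bool.eq_iff_iff]
            simp only [List.map_cons, decide_eq_true_eq, hgv, List.cons.injEq, true_and]
          · rw [if_pos (fun h => hgv (hgdeq.symm.trans h))]
            have hne : ((run : Int) :: (grp rest 0).map (fun n => ((n : Nat) : Int)))
                ≠ instructions[idx] :: instructions.drop (idx+1) := by
              intro h; injection h with h1 _; exact hgv h1.symm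
            exact (decide_eq_false hne).symm
    · rw [show altScan instructions (c :: rest) idx run = altScan instructions rest idx (run+1) by
          simp [altScan, hc]]
      rw [show grp (c :: rest) run = grp rest (run+1) by simp [grp, hc]]
      exact ih idx (run+1) hidx

lemma flen_splitOn (cs : List Char) : flen (PySem.Chars.splitOn cs ['.']) = grp cs 0 := by
  have h := go_flen (cs.length + 1) cs [] [] (by omega)
  simpa [PySem.Chars.splitOn, flen] using h

-- ===== VERDICT (by name: the statement is the Claim_ definition above) =====
theorem is_possible_springs_spec : Claim_equal_is_possible_springs := by
  intro springs instructions _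
  unfold Spec_is_possible_springs is_possible_springs is_possible_springs_alt
  rw [altScan_eq instructions springs.toList 0 0 (Nat.zero_le _), List.drop_zero]
  have hmap : ((PySem.Chars.splitOn springs.toList ['.']).filter (fun x => !x.isEmpty)).map
        (fun g => ((g.length : Nat) : Int))
      = (grp springs.toList 0).map (fun n => ((n : Nat) : Int)) := by
    rw [← flen_splitOn springs.toList]
    simp [flen, List.map_map]
  rw [← hmap]
  by_cases hl : ((PySem.Chars.splitOn springs.toList ['.']).filter (fun x => !x.isEmpty)).length
      = instructions.length
  · simp only [if_neg (not_not_intro hl)]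
    exact aLoop_eq _ _ hl
  · simp only [if_pos hl]
    have hne : ((PySem.Chars.splitOn springs.toList ['.']).filter (fun x => !x.isEmpty)).map
          (fun g => ((g.length : Nat) : Int)) ≠ instructions := by
      intro h; exact hl (by rw [← h]; simp)
    exact (decide_eq_false hne).symm
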